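-- pv_equiv track=rewrite | github.com/cdccnleo/RQA2025 | unified_interfaces_management.py | _find_common_interfaces
-- ===== SOURCE A (Python) =====
-- from typing import Dict, List, Set
--
-- def _find_common_interfaces(distribution: Dict) -> Dict[str, List[str]]:
--     """查找常用接口"""
--     interface_usage = {}
--
--     # 统计每个接口在哪些模块中使用
--     for module, interfaces in distribution['module_interfaces'].items():
--         for interface in interfaces:
--             if interface not in interface_usage:
--                 interface_usage[interface] = []
--             interface_usage[interface].append(module)
--
--     # 返回使用频率高的接口
--     common_interfaces = {name: modules for name, modules in interface_usage.items()
--                          if len(modules) >= 2}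
--
--     return common_interfaces
-- ===== SOURCE B (Python) =====
-- def _find_common_interfaces(distribution):
--     """Count interface occurrences first, then collect modules only for interfaces used >= 2 times."""
--     module_interfaces = distribution['module_interfaces']
--     counts = {}
--     for interfaces in module_interfaces.values():
--         for interface in interfaces:
--             counts[interface] = counts.get(interface, 0) + 1
--     common = {}
--     for module, interfaces in module_interfaces.items():
--         for interface in interfaces:
--             if counts[interface] >= 2:
--                 common.setdefault(interface, []).append(module)
--     return common
-- ===== Notes on version B (the rewrite author's own statement) =====
-- stated objective: alternative
-- what changed: Instead of eagerly grouping every interface's module list and then filtering groups by length >= 2, B first makes a counting pass over the interfaces and then a second pass that appends a module to the result only for interfaces whose precomputed count is >= 2, so no per-interface module list is ever built for rare interfaces.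
import Mathlib
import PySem

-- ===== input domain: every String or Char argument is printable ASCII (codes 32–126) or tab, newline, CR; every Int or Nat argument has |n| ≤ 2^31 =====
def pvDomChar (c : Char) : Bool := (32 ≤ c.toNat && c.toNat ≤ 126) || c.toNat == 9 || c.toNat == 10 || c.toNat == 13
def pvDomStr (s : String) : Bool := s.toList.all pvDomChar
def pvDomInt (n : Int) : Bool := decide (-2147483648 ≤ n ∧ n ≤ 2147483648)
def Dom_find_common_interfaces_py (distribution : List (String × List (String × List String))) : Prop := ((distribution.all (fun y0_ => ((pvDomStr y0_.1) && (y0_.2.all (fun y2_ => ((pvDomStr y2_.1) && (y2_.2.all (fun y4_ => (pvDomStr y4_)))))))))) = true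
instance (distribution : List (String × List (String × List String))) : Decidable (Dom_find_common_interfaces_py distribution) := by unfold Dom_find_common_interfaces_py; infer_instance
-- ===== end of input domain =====

-- B replaces A's "group every interface's modules, then filter groups by length >= 2" with a counting
-- pass followed by a collecting pass that only ever appends modules for interfaces counted >= 2
-- (alternative decomposition, same asymptotic cost).

-- ===== PORT A =====
-- Literal port of A: group-then-filter.  'usage[interface] = [] if absent; usage[interface].append(module)',
-- then the dict comprehension keeping entries with len(modules) >= 2.
def find_common_interfaces_py (distribution : List (String × List (String × List String))) : List (String × List String) :=
  match (PySem.Dict.ofList distribution).get? "module_interfaces" with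
  | none => []  -- KeyError in Python; excluded by Pre_
  | some mi =>
    let interface_usage :=
      (PySem.Dict.ofList mi).items.foldl
        (fun (u : PySem.Dict String (List String)) p =>
          p.2.foldl
            (fun (u : PySem.Dict String (List String)) interface =>
              let u := if u.contains interface then u else u.insert interface []
              u.insert interface (u.getD interface [] ++ [p.1]))
            u)
        PySem.Dict.empty
    (interface_usage.items.foldl
      (fun (c : PySem.Dict String (List String)) kv =>
        if 2 ≤ kv.2.length then c.insert kv.1 kv.2 else c)
      PySem.Dict.empty).items

-- ===== PORT B =====
-- Literal port of B: first pass counts occurrences ('counts[i] = counts.get(i, 0) + 1'), second pass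
-- appends the module only when the precomputed count is >= 2 ('common.setdefault(i, []).append(module)',
-- which is exactly Dict.modify i [] (· ++ [module])).
def find_common_interfaces_py_alt (distribution : List (String × List (String × List String))) : List (String × List String) :=
  match (PySem.Dict.ofList distribution).get? "module_interfaces" with
  | none => []  -- B evaluates distribution['module_interfaces'] too; excluded by Pre_
  | some mi =>
    let miD := PySem.Dict.ofList mi
    let counts : PySem.Dict String Int :=
      miD.values.foldl
        (fun c interfaces =>
          interfaces.foldl
            (fun (c : PySem.Dict String Int) i => c.insert i (c.getD i 0 + 1)) c)
        PySem.Dict.empty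
    (miD.items.foldl
      (fun (r : PySem.Dict String (List String)) p =>
        p.2.foldl
          (fun (r : PySem.Dict String (List String)) i =>
            if 2 ≤ counts.getD i 0 then r.modify i [] (· ++ [p.1]) else r)
          r)
      PySem.Dict.empty).items

-- ===== PRECONDITION & SPEC =====
-- Pre_ excludes exactly the inputs whose outer dict has no 'module_interfaces' key: there the Python A
-- raises KeyError (and B raises too).
def Pre_find_common_interfaces_py (distribution : List (String × List (String × List String))) : Prop :=
  "module_interfaces" ∈ distribution.map Prod.fst
instance (distribution : List (String × List (String × List String))) : Decidable (Pre_find_common_interfaces_py distribution) := by unfold Pre_find_common_interfaces_py; infer_instance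
def pvWitness_find_common_interfaces_py : (List (String × List (String × List String))) :=
  [("module_interfaces", [("m1", ["a", "b"]), ("m2", ["a"])])]
def Spec_find_common_interfaces_py (distribution : List (String × List (String × List String))) (out : List (String × List String)) : Prop := out = find_common_interfaces_py_alt distribution
instance (distribution : List (String × List (String × List String))) (out : List (String × List String)) : Decidable (Spec_find_common_interfaces_py distribution out) := by unfold Spec_find_common_interfaces_py; infer_instance

-- ===== CLAIM (what is proved, stated in full; the proofs are below) =====
def Claim_equal_find_common_interfaces_py : Prop := ∀ (distribution : List (String × List (String × List String))), Dom_find_common_interfaces_py distribution → Pre_find_common_interfaces_py distribution → Spec_find_common_interfaces_py distribution (find_common_interfaces_py distribution)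

-- ===== LEMMAS AND PROOFS =====

-- A's two-step body ('create empty list if absent, then append') is Dict.modify.
theorem pvStepA_eq (u : PySem.Dict String (List String)) (i m : String) :
    (let u' := if u.contains i then u else u.insert i [];
     u'.insert i (u'.getD i [] ++ [m])) = u.modify i [] (· ++ [m]) := by
  by_cases h : u.contains i = true
  · simp [h, PySem.Dict.modify]
  · have hf : u.contains i = false := by simpa using h
    simp only [hf, Bool.false_eq_true, ite_false]
    rw [PySem.Dict.getD_insert_self, PySem.Dict.insert_insert_self, PySem.Dict.modify,
      PySem.Dict.getD_of_not_contains u [] hf]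

-- The items of a grouping loop: first-occurrence-ordered keys, each with all its values in order.
theorem pvGroupItems (l : List (String × String)) :
    (l.foldl (fun (d : PySem.Dict String (List String)) q => d.modify q.1 [] (· ++ [q.2]))
        PySem.Dict.empty).items
      = (PySem.Set.ofList (l.map Prod.fst)).map
          (fun k => (k, (l.filter (fun q => q.1 == k)).map (fun q => q.2))) := by
  have hnd := PySem.Dict.nodup_keys_foldl_modify_key l Prod.fst []
    (fun _ q v => v ++ [q.2]) PySem.Dict.empty PySem.Dict.nodup_keys_empty
  have hk := PySem.Dict.keys_foldl_modify_key l Prod.fst []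
    (fun _ q v => v ++ [q.2]) PySem.Dict.empty
  rw [PySem.Dict.items_eq_map_keys _ hnd []]
  rw [hk, PySem.Dict.keys_empty, PySem.Set.update_nil_left]
  refine List.map_congr_left fun k _ => ?_
  rw [PySem.Dict.getD_foldl_modify_append l PySem.Dict.empty k, PySem.Dict.getD_empty]
  rfl

-- Set.ofList (first-occurrence dedup) commutes with filter.
theorem pvOfList_filter (p : String → Bool) (xs : List String) :
    PySem.Set.ofList (xs.filter p) = (PySem.Set.ofList xs).filter p := by
  induction xs with
  | nil => rfl
  | cons x xs ih =>
    by_cases hx : p x = true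
    · rw [List.filter_cons_of_pos hx, PySem.Set.ofList_cons, PySem.Set.ofList_cons, ih]
      simp only [PySem.Set.discard, List.filter_cons_of_pos hx, List.filter_filter]
      exact congrArg _ (List.filter_congr fun y _ => Bool.and_comm _ _)
    · rw [List.filter_cons_of_neg hx, PySem.Set.ofList_cons, ih]
      simp only [PySem.Set.discard, List.filter_cons_of_neg hx, List.filter_filter]
      refine List.filter_congr fun y _ => ?_
      by_cases hy : y = x
      · subst hy; simp [hx]
      · simp [hy]

-- A's trailing dict comprehension keeps exactly the items with len >= 2 (keys are unique).
theorem pvComprItems (u : PySem.Dict String (List String)) (hnd : u.keys.Nodup) :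
    (u.items.foldl
      (fun (c : PySem.Dict String (List String)) kv =>
        if 2 ≤ kv.2.length then c.insert kv.1 kv.2 else c)
      PySem.Dict.empty).items
    = u.items.filter (fun kv => decide (2 ≤ kv.2.length)) := by
  have h1 : (u.items.filter (fun kv => decide (2 ≤ kv.2.length))).foldl
      (fun (c : PySem.Dict String (List String)) kv => c.insert kv.1 kv.2) PySem.Dict.empty
      = u.items.foldl
          (fun (c : PySem.Dict String (List String)) kv =>
            if 2 ≤ kv.2.length then c.insert kv.1 kv.2 else c)
          PySem.Dict.empty := by
    rw [List.foldl_filter]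
    simp only [decide_eq_true_eq]
  rw [← h1]
  have hsub : ((u.items.filter (fun kv => decide (2 ≤ kv.2.length))).map Prod.fst).Nodup := by
    refine List.Nodup.sublist (List.Sublist.map Prod.fst List.filter_sublist) ?_
    simpa [PySem.Dict.keys] using hnd
  rw [PySem.Dict.items_foldl_insert_fresh _ Prod.fst Prod.snd PySem.Dict.empty
      (fun a _ => PySem.Dict.contains_empty a.1) hsub]
  simp [show (PySem.Dict.empty : PySem.Dict String (List String)).items = [] from rfl]

-- Core equality on the inner dict mi (both ports reach this point after the same key lookup).
theorem pvCore (mi : List (String × List String)) :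
    (((PySem.Dict.ofList mi).items.foldl
        (fun (u : PySem.Dict String (List String)) p =>
          p.2.foldl
            (fun (u : PySem.Dict String (List String)) interface =>
              let u := if u.contains interface then u else u.insert interface []
              u.insert interface (u.getD interface [] ++ [p.1]))
            u)
        PySem.Dict.empty).items.foldl
      (fun (c : PySem.Dict String (List String)) kv =>
        if 2 ≤ kv.2.length then c.insert kv.1 kv.2 else c)
      PySem.Dict.empty).items
    =
    ((PySem.Dict.ofList mi).items.foldl
      (fun (r : PySem.Dict String (List String)) p =>
        p.2.foldl
          (fun (r : PySem.Dict String (List String)) i =>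
            if 2 ≤ ((PySem.Dict.ofList mi).values.foldl
                (fun c interfaces =>
                  interfaces.foldl
                    (fun (c : PySem.Dict String Int) i => c.insert i (c.getD i 0 + 1)) c)
                PySem.Dict.empty).getD i 0
            then r.modify i [] (· ++ [p.1]) else r)
          r)
      PySem.Dict.empty).items := by
  set l := (PySem.Dict.ofList mi).items with hl
  set pairs : List (String × String) := l.flatMap (fun p => p.2.map (fun i => (i, p.1))) with hpairs
  set ks : List String := l.flatMap (fun p => p.2) with hks
  have hmapfst : pairs.map Prod.fst = ks := by
    rw [hpairs, hks, List.map_flatMap]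
    refine congrArg (fun f => List.flatMap f l) (funext fun p => ?_)
    rw [List.map_map]; simp [Function.comp_def]
  have hcount : ∀ i, ((PySem.Dict.ofList mi).values.foldl
      (fun c interfaces =>
        interfaces.foldl
          (fun (c : PySem.Dict String Int) i => c.insert i (c.getD i 0 + 1)) c)
      PySem.Dict.empty).getD i 0 = (ks.count i : Int) := by
    intro i
    have hv : (PySem.Dict.ofList mi).values = l.map (fun p => p.2) := rfl
    rw [hv, List.foldl_map, ← List.foldl_flatMap, ← hks,
      PySem.Dict.getD_foldl_insert_add_one, PySem.Dict.getD_empty]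
    simp
  have hlen : ∀ k, ((pairs.filter (fun q => q.1 == k)).map (fun q => q.2)).length = ks.count k := by
    intro k
    rw [← hmapfst, List.length_map, ← List.countP_eq_length_filter]
    simp [List.count_eq_countP, List.countP_map]; rfl
  have hA1 : l.foldl
      (fun (u : PySem.Dict String (List String)) p =>
        p.2.foldl
          (fun (u : PySem.Dict String (List String)) interface =>
            let u := if u.contains interface then u else u.insert interface []
            u.insert interface (u.getD interface [] ++ [p.1]))
          u)
      PySem.Dict.empty
      = pairs.foldl (fun (d : PySem.Dict String (List String)) q => d.modify q.1 [] (· ++ [q.2]))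
          PySem.Dict.empty := by
    rw [hpairs, List.foldl_flatMap]
    refine congrFun (congrFun (congrArg List.foldl (funext fun u => funext fun p => ?_)) _) _
    rw [List.foldl_map]
    refine congrFun (congrFun (congrArg List.foldl (funext fun u => funext fun i => ?_)) _) _
    exact pvStepA_eq u i p.1
  have hnd := PySem.Dict.nodup_keys_foldl_modify_key pairs Prod.fst []
    (fun _ q v => v ++ [q.2]) PySem.Dict.empty PySem.Dict.nodup_keys_empty
  have hB1 : l.foldl
      (fun (r : PySem.Dict String (List String)) p =>
        p.2.foldl
          (fun (r : PySem.Dict String (List String)) i =>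
            if 2 ≤ ((PySem.Dict.ofList mi).values.foldl
                (fun c interfaces =>
                  interfaces.foldl
                    (fun (c : PySem.Dict String Int) i => c.insert i (c.getD i 0 + 1)) c)
                PySem.Dict.empty).getD i 0
            then r.modify i [] (· ++ [p.1]) else r)
          r)
      PySem.Dict.empty
      = (pairs.filter (fun q => decide (2 ≤ (ks.count q.1 : Int)))).foldl
          (fun (d : PySem.Dict String (List String)) q => d.modify q.1 [] (· ++ [q.2]))
          PySem.Dict.empty := by
    simp only [hcount]
    rw [List.foldl_filter]
    simp only [decide_eq_true_eq]
    rw [hpairs, List.foldl_flatMap]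
    refine congrFun (congrFun (congrArg List.foldl (funext fun r => funext fun p => ?_)) _) _
    rw [List.foldl_map]
  rw [hA1, pvComprItems _ hnd, pvGroupItems pairs, hB1, pvGroupItems]
  rw [List.filter_map, hmapfst]
  have hkeysB : ∀ p : String → Bool,
      (pairs.filter (fun q => p q.1)).map Prod.fst = ks.filter p := by
    intro p
    rw [← hmapfst, List.filter_map]
    simp only [Function.comp_def]
  rw [show (pairs.filter (fun q => decide (2 ≤ (ks.count q.1 : Int)))).map Prod.fst
      = ks.filter (fun k => decide (2 ≤ (ks.count k : Int))) from hkeysB (fun k => decide (2 ≤ (ks.count k : Int))),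
    pvOfList_filter]
  refine Eq.trans (congrArg _ (List.filter_congr fun k _ => ?_))
    (List.map_congr_left fun k hk => ?_)
  · simp only [Function.comp_apply]
    rw [hlen k]
    exact decide_eq_decide.mpr (by omega)
  · have hPk : decide (2 ≤ (ks.count k : Int)) = true := (List.mem_filter.mp hk).2
    refine congrArg (fun t : List (String × String) => (k, t.map (fun q => q.2))) ?_
    rw [List.filter_filter]
    refine List.filter_congr fun q _ => ?_
    by_cases hq : q.1 = k
    · have h2 : (2 : Int) ≤ (ks.count k : Int) := of_decide_eq_true hPk
      simp [hq]
      omega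
    · simp [hq]

-- ===== VERDICT (by name: the statement is the Claim_ definition above) =====
theorem find_common_interfaces_py_spec : Claim_equal_find_common_interfaces_py := by
  intro distribution _hdom _hpre
  unfold Spec_find_common_interfaces_py find_common_interfaces_py find_common_interfaces_py_alt
  cases (PySem.Dict.ofList distribution).get? "module_interfaces" with
  | none => rfl
  | some mi => exact pvCore mi
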